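-- pv_equiv track=rewrite | github.com/schfrnick/group_hw2 | runtest2.py | checkSpecific
-- ===== SOURCE A (Python) =====
-- def toArray(file):
--     temp = []
--
--     for line in file:
--         temp.append(line)
--
--     return temp
--
-- def checkSpecific(expected, actual):
--     if expected == None:
--         return actual == None
--     success = True
--
--     expected_array = []
--     actual_array = []
--
--     expected_array = toArray(expected)
--     actual_array = toArray(actual)
--
--     temp = 0
--     marker = 0
--
--     for i in range(len(expected_array)):
--         for j in range(marker, len(actual_array)):
--             if j > len(actual_array) - 1:
--                 success = False
--             if expected_array[i] == actual_array[j]: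
--                 marker = j + 1
--                 temp += 1
--                 break;
--     if temp != len(expected_array):
--         success = False
--     return success
-- ===== SOURCE B (Python) =====
-- def checkSpecific(expected, actual):
--     if expected is None:
--         return actual is None
--     remaining = list(expected)
--     for line in actual:
--         if remaining and remaining[0] == line:
--             remaining.pop(0)
--     return not remaining
-- ===== Notes on version B (the rewrite author's own statement) =====
-- stated objective: faster
-- what changed: Replaces the per-expected-line rescans of actual from the marker (quadratic when lines are missing) with a single pass over actual that consumes a remaining-expected list head on match.
import Mathlib
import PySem

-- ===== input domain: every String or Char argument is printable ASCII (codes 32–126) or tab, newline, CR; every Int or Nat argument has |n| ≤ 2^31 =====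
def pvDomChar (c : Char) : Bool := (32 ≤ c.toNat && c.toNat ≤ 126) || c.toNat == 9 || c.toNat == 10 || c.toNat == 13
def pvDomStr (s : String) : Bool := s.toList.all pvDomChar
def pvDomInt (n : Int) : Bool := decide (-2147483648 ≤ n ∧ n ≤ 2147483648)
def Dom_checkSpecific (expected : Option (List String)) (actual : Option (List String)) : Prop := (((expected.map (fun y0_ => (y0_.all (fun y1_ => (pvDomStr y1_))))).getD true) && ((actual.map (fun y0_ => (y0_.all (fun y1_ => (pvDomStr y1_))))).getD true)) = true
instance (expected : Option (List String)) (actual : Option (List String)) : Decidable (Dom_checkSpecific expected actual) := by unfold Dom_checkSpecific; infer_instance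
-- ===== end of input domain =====

-- B replaces A's per-expected-line rescans of actual with one single pass over actual (objective: faster).
-- ===== PORT A =====
def toArrayA (file : List String) : List String :=
  file.foldl (fun temp line => temp ++ [line]) []

-- inner 'for j in range(marker, len(actual_array))' loop with its break; state = (success, temp, marker)
def innerA (e : String) (act : List String) (st : Bool × Nat × Nat) (j : Nat) : Bool × Nat × Nat :=
  if h : j < act.length then
    let st1 := if (j : Int) > (act.length : Int) - 1 then (false, st.2.1, st.2.2) else st
    if e == act[j] then (st1.1, st1.2.1 + 1, j + 1)
    else innerA e act st1 (j + 1)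
  else st
termination_by act.length - j

def foldA (act : List String) (exp : List String) (st : Bool × Nat × Nat) : Bool × Nat × Nat :=
  exp.foldl (fun st e => innerA e act st st.2.2) st

def checkSpecific (expected : Option (List String)) (actual : Option (List String)) : Bool :=
  match expected with
  | none => match actual with | none => true | some _ => false
  | some exp =>
    match actual with
    | none => false   -- Python raises TypeError here; excluded by Pre_checkSpecific
    | some act =>
      let ea := toArrayA exp
      let aa := toArrayA act
      let st := foldA aa ea (true, 0, 0)
      if st.2.1 ≠ ea.length then false else st.1

-- ===== PORT B =====
-- one step of B's loop over actual: drop the head of the remaining expected list on match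
def stepB (rem : List String) (line : String) : List String :=
  match rem with
  | [] => []
  | e :: es => if e == line then es else e :: es

def checkSpecific_alt (expected : Option (List String)) (actual : Option (List String)) : Bool :=
  match expected with
  | none => match actual with | none => true | some _ => false
  | some exp =>
    match actual with
    | none => false   -- Python raises TypeError here; excluded by Pre_checkSpecific
    | some act => (act.foldl stepB exp).isEmpty

-- ===== PRECONDITION & SPEC =====
-- Pre_ excludes exactly the inputs where A raises TypeError: expected a list while actual is None.
def Pre_checkSpecific (expected : Option (List String)) (actual : Option (List String)) : Prop :=
  expected = none ∨ actual ≠ none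
instance (expected : Option (List String)) (actual : Option (List String)) : Decidable (Pre_checkSpecific expected actual) := by unfold Pre_checkSpecific; infer_instance
def pvWitness_checkSpecific : Option (List String) × Option (List String) := (some ["a", "b"], some ["a", "c", "b"])
def Spec_checkSpecific (expected : Option (List String)) (actual : Option (List String)) (out : Bool) : Prop := out = checkSpecific_alt expected actual
instance (expected : Option (List String)) (actual : Option (List String)) (out : Bool) : Decidable (Spec_checkSpecific expected actual out) := by unfold Spec_checkSpecific; infer_instance

-- ===== CLAIM (what is proved, stated in full; the proofs are below) =====
def Claim_equal_checkSpecific : Prop := ∀ (expected : Option (List String)) (actual : Option (List String)), Dom_checkSpecific expected actual → Pre_checkSpecific expected actual → Spec_checkSpecific expected actual (checkSpecific expected actual)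

-- ===== LEMMAS AND PROOFS =====

-- reference subsequence predicate both sides are reduced to
def sub : List String → List String → Bool
  | [], _ => true
  | _ :: _, [] => false
  | e :: es, a :: as => if e == a then sub es as else (sub (e :: es) as)

theorem toArrayA_eq (l : List String) : toArrayA l = l := by
  suffices h : ∀ acc : List String, l.foldl (fun temp line => temp ++ [line]) acc = acc ++ l by
    simpa [toArrayA] using h []
  induction l with
  | nil => intro acc; simp
  | cons x xs ih => intro acc; simp [List.foldl, ih]

theorem foldB_isEmpty (act : List String) : ∀ exp : List String,
    (act.foldl stepB exp).isEmpty = sub exp act := by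
  induction act with
  | nil => intro exp; cases exp <;> simp [sub, List.isEmpty]
  | cons a as ih =>
    intro exp
    cases exp with
    | nil => simp [List.foldl, stepB, sub, ih]
    | cons e es =>
      by_cases h : e == a
      · simp [List.foldl, stepB, sub, h, ih]
      · simp [List.foldl, stepB, sub, h, ih]

-- spec-side rendering of innerA's search, recursing on the dropped suffix of act
def findStep (e : String) (t m : Nat) : List String → Nat → Bool × Nat × Nat
  | [], _ => (true, t, m)
  | a :: ys, j => if e == a then (true, t + 1, j + 1) else findStep e t m ys (j + 1)

theorem innerA_eq_findStep (e : String) (act : List String) :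
    ∀ (k j t m : Nat), act.length ≤ j + k →
      innerA e act (true, t, m) j = findStep e t m (act.drop j) j := by
  intro k
  induction k with
  | zero =>
    intro j t m hk
    rw [innerA, List.drop_eq_nil_of_le (by omega)]
    have h : ¬ j < act.length := by omega
    simp [findStep, h]
  | succ k ihk =>
    intro j t m hk
    by_cases h : j < act.length
    · rw [List.drop_eq_getElem_cons h, innerA]
      have hle : ¬ ((j : Int) > (act.length : Int) - 1) := by omega
      simp only [hle, dif_pos h, if_false]
      by_cases he : e == act[j]
      · simp [findStep, he]
      · rw [ihk (j + 1) t m (by omega)]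
        simp [findStep, he]
    · rw [innerA, List.drop_eq_nil_of_le (by omega)]
      simp [findStep, h]

theorem foldA_main (act : List String) : ∀ (exp : List String) (m t : Nat), m ≤ act.length →
    (foldA act exp (true, t, m)).1 = true ∧
    (foldA act exp (true, t, m)).2.1 ≤ t + exp.length ∧
    ((foldA act exp (true, t, m)).2.1 = t + exp.length ↔ sub exp (act.drop m) = true) := by
  intro exp
  induction exp with
  | nil => intro m t hm; simp [foldA, sub]
  | cons e es ih =>
    intro m t hm
    have hstep : foldA act (e :: es) (true, t, m)
        = foldA act es (findStep e t m (act.drop m) m) := by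
      simp only [foldA, List.foldl]
      rw [innerA_eq_findStep e act act.length m t m (Nat.le_add_left _ _)]
    rw [hstep]
    -- inner induction over the suffix being scanned
    suffices Q : ∀ (ys : List String) (j : Nat), act.drop j = ys → j ≤ act.length → ∀ t,
        (foldA act es (findStep e t m ys j)).1 = true ∧
        (foldA act es (findStep e t m ys j)).2.1 ≤ t + (e :: es).length ∧
        ((foldA act es (findStep e t m ys j)).2.1 = t + (e :: es).length ↔ sub (e :: es) ys = true) by
      exact Q (act.drop m) m rfl hm t
    intro ys
    induction ys with
    | nil =>
      intro j hdrop hj t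
      obtain ⟨h1, h2, h3⟩ := ih m t hm
      refine ⟨by simpa [findStep] using h1, ?_, ?_⟩
      · simp only [findStep, List.length_cons]; omega
      · constructor
        · intro h; exfalso; simp only [findStep, List.length_cons] at h; omega
        · intro h; exact absurd h (by simp [sub])
    | cons a ys ihy =>
      intro j hdrop hj t
      have hjlt : j < act.length := by
        by_contra hc
        rw [List.drop_eq_nil_of_le (by omega)] at hdrop
        simp at hdrop
      have hcons := List.drop_eq_getElem_cons hjlt
      rw [hdrop] at hcons
      have hget : act[j] = a := (List.cons.inj hcons.symm).1
      have hdrop' : act.drop (j + 1) = ys := (List.cons.inj hcons.symm).2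
      by_cases he : e == a
      · have hfs : findStep e t m (a :: ys) j = (true, t + 1, j + 1) := by
          simp [findStep, he]
        obtain ⟨h1, h2, h3⟩ := ih (j + 1) (t + 1) (by omega)
        rw [hdrop'] at h3
        rw [hfs]
        refine ⟨h1, ?_, ?_⟩
        · simp only [List.length_cons]; omega
        · have hsub : sub (e :: es) (a :: ys) = sub es ys := by simp [sub, he]
          rw [hsub]
          constructor
          · intro h; exact h3.1 (by simp only [List.length_cons] at h; omega)
          · intro h; have := h3.2 h; simp only [List.length_cons]; omega
      · have hfs : findStep e t m (a :: ys) j = findStep e t m ys (j + 1) := by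
          simp [findStep, he]
        obtain ⟨h1, h2, h3⟩ := ihy (j + 1) hdrop' (by omega) t
        rw [hfs]
        refine ⟨h1, h2, ?_⟩
        rw [h3]
        simp [sub, he]

-- ===== VERDICT (by name: the statement is the Claim_ definition above) =====
theorem checkSpecific_spec : Claim_equal_checkSpecific := by
  intro expected actual _ hpre
  unfold Spec_checkSpecific
  match expected, actual with
  | none, none => rfl
  | none, some act => rfl
  | some exp, none =>
    exfalso
    rcases hpre with h | h
    · exact (Option.some_ne_none _ h).elim
    · exact h rfl
  | some exp, some act =>
    simp only [checkSpecific, checkSpecific_alt, toArrayA_eq, foldB_isEmpty]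
    obtain ⟨h1, h2, h3⟩ := foldA_main act exp 0 0 (Nat.zero_le _)
    simp only [List.drop_zero, Nat.zero_add] at h3
    by_cases hs : sub exp act = true
    · have := h3.2 hs
      simp [this, h1, hs]
    · have : (foldA act exp (true, 0, 0)).2.1 ≠ exp.length := fun h => hs (h3.1 h)
      simp [this]
      cases hsub : sub exp act
      · rfl
      · exact absurd hsub hs
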